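-- pv_equiv track=rewrite | github.com/asweigart/programmedpatterns | book/visualpatterns.py | formula24
-- ===== SOURCE A (Python) =====
-- def formula24(step):
--     count = 1
--     i = 2
--     while True:
--         if i > step:
--             break
--         count += 1
--         i += 1
--
--         if i > step:
--             break
--         count += 2
--         i += 1
--
--
--         if i > step:
--             break
--         count += 2
--         i += 1
--     return count
-- ===== SOURCE B (Python) =====
-- def formula24(step):
--     if step < 2:
--         return 1
--     return 2 * step - 2 - (step - 2) // 3
-- ===== Notes on version B (the rewrite author's own statement) =====
-- stated objective: faster
-- what changed: Replaced the while-loop accumulating the cyclic increments with a single closed-form arithmetic expression using floor division.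
import Mathlib
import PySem

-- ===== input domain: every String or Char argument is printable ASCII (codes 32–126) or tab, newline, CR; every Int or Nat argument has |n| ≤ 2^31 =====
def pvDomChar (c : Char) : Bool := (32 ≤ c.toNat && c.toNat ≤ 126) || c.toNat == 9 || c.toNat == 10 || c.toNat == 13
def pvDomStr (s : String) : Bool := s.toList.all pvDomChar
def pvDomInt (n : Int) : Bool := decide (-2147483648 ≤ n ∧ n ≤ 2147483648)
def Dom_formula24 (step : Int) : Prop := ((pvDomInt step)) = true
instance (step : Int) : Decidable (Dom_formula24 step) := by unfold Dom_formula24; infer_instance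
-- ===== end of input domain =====

-- B replaces A's increment loop by a closed-form formula (O(1) instead of O(step)).

-- ===== PORT A =====
-- one pass of A's while-body: three break-checks, increments +1,+2,+2
def formula24Loop (step count i : Int) : Int :=
  if h1 : i > step then count
  else if h2 : i + 1 > step then count + 1
  else if h3 : i + 2 > step then count + 3
  else formula24Loop step (count + 5) (i + 3)
termination_by (step - i).toNat
decreasing_by omega

def formula24 (step : Int) : Int := formula24Loop step 1 2

-- ===== PORT B =====
def formula24_alt (step : Int) : Int :=
  if step < 2 then 1
  else 2 * step - 2 - PySem.Int.floordiv (step - 2) 3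

-- ===== PRECONDITION & SPEC =====
def Spec_formula24 (step : Int) (out : Int) : Prop := out = formula24_alt step
instance (step : Int) (out : Int) : Decidable (Spec_formula24 step out) := by unfold Spec_formula24; infer_instance

-- ===== CLAIM (what is proved, stated in full; the proofs are below) =====
def Claim_equal_formula24 : Prop := ∀ (step : Int), Dom_formula24 step → Spec_formula24 step (formula24 step)

-- ===== LEMMAS AND PROOFS =====
-- loop characterisation: for i ≤ step, the loop adds 2*(step-i+1) - ((step-i)/3 + 1) to count
theorem formula24Loop_eq (step : Int) : ∀ (n : Nat) (count i : Int), step - i = (n : Int) →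
    formula24Loop step count i = count + 2 * ((n : Int) + 1) - ((n / 3 : Nat) + 1) := by
  intro n
  induction n using Nat.strong_induction_on with
  | _ n ih =>
    intro count i h
    unfold formula24Loop
    split_ifs with h1 h2 h3
    · omega
    · have hn : n = 0 := by omega
      subst hn; simp; omega
    · have hn : n = 1 := by omega
      subst hn; norm_num; omega
    · by_cases hn2 : n = 2
      · subst hn2
        unfold formula24Loop
        rw [dif_pos (by omega : i + 3 > step)]
        norm_num; omega
      have hn3 : 3 ≤ n := by omega
      have := ih (n - 3) (Nat.sub_lt (by omega) (by norm_num)) (count + 5) (i + 3) (by omega)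
      rw [this]
      have hd : (n - 3) / 3 = n / 3 - 1 := by omega
      have h1 : 1 ≤ n / 3 := by omega
      rw [hd]
      push_cast [Nat.cast_sub h1]
      omega

-- ===== VERDICT (by name: the statement is the Claim_ definition above) =====
theorem formula24_spec : Claim_equal_formula24 := by
  intro step _
  unfold Spec_formula24 formula24 formula24_alt
  by_cases h : step < 2
  · unfold formula24Loop
    split_ifs with h1 h2 h3 <;> omega
  · have hnn : 0 ≤ step - 2 := by omega
    have := formula24Loop_eq step (step - 2).toNat 1 2 (by omega)
    rw [this, if_neg h, PySem.Int.floordiv_eq_ediv_of_pos (by omega)]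
    have : ((step - 2).toNat : Int) = step - 2 := by omega
    omega
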